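-- pv_equiv track=rewrite | github.com/thewh1teagle/vibe | scripts/landing_links.py | get_asset_info
-- ===== SOURCE A (Python) =====
-- def get_asset_info(name: str) -> dict[str, str]:
--     platform_map = {
--         ".deb": {"platform": "Linux", "arch": "darwin-aarch64" if "aarch64" in name else "linux-x86_64"},
--         ".exe": {"platform": "Windows", "arch": "windows-x86_64" if "x64-setup" in name else "unknown"},
--         ".dmg": {"platform": "MacOS", "arch": "darwin-aarch64" if "aarch64" in name else "darwin-x86_64"},
--     }
--
--     extension = next((ext for ext in platform_map if ext in name), "unknown")
--     return platform_map.get(extension, {})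
-- ===== SOURCE B (Python) =====
-- def get_asset_info(name: str) -> dict[str, str]:
--     # single left-to-right scan: at each '.', compare the next three chars once
--     deb = exe = dmg = False
--     for i in range(len(name) - 3):
--         if name[i] == ".":
--             tail = name[i + 1:i + 4]
--             deb = deb or tail == "deb"
--             exe = exe or tail == "exe"
--             dmg = dmg or tail == "dmg"
--     if deb:
--         return {"platform": "Linux", "arch": "darwin-aarch64" if "aarch64" in name else "linux-x86_64"}
--     if exe:
--         return {"platform": "Windows", "arch": "windows-x86_64" if "x64-setup" in name else "unknown"}
--     if dmg:
--         return {"platform": "MacOS", "arch": "darwin-aarch64" if "aarch64" in name else "darwin-x86_64"}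
--     return {}
-- ===== Notes on version B (the rewrite author's own statement) =====
-- stated objective: alternative
-- what changed: Instead of building a nested dict and running three separate substring searches over the name, B makes one character-level pass that, at each dot character, compares the next three characters and sets deb/exe/dmg flags, then branches on the flags.
import Mathlib
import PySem

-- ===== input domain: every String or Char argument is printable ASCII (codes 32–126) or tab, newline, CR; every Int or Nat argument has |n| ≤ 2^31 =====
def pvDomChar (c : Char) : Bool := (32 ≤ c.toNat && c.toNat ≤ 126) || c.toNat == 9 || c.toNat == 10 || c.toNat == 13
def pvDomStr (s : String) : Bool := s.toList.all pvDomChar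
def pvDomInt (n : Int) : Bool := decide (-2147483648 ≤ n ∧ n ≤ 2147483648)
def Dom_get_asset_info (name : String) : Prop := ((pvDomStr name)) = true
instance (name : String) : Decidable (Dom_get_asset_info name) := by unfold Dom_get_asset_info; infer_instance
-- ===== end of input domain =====

-- B replaces A's dict build + key-scan + lookup with ONE character-level pass that flags every ".deb"/".exe"/".dmg" occurrence, then branches (objective: alternative).


-- ===== PORT A =====
-- literal transliteration: build the nested dict, scan its keys for the first substring hit, then .get with default {}
def get_asset_info (name : String) : List (String × String) :=
  let platform_map : PySem.Dict String (List (String × String)) :=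
    ((PySem.Dict.empty.insert ".deb"
        [("platform", "Linux"), ("arch", if PySem.Str.isIn "aarch64" name then "darwin-aarch64" else "linux-x86_64")]).insert ".exe"
        [("platform", "Windows"), ("arch", if PySem.Str.isIn "x64-setup" name then "windows-x86_64" else "unknown")]).insert ".dmg"
        [("platform", "MacOS"), ("arch", if PySem.Str.isIn "aarch64" name then "darwin-aarch64" else "darwin-x86_64")]
  let extension := ((platform_map.keys.find? (fun ext => PySem.Str.isIn ext name)).getD "unknown")
  platform_map.getD extension []

-- ===== PORT B =====
-- Source B's single scan over the characters: at each '.', the next three chars are compared once;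
-- the loop is the obvious structural recursion over the character list (boolean `or` accumulation
-- is direction-insensitive, so the flags are the same values the Python loop computes)
def scanExts : List Char → Bool × Bool × Bool
  | c :: a :: b :: d :: rest =>
      let (p, q, r) := scanExts (a :: b :: d :: rest)
      if c = '.' then
        (p || (a = 'd' && b = 'e' && d = 'b'),
         q || (a = 'e' && b = 'x' && d = 'e'),
         r || (a = 'd' && b = 'm' && d = 'g'))
      else (p, q, r)
  | _ => (false, false, false)

def get_asset_info_alt (name : String) : List (String × String) :=
  let flags := scanExts name.toList
  if flags.1 then
    [("platform", "Linux"), ("arch", if PySem.Str.isIn "aarch64" name then "darwin-aarch64" else "linux-x86_64")]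
  else if flags.2.1 then
    [("platform", "Windows"), ("arch", if PySem.Str.isIn "x64-setup" name then "windows-x86_64" else "unknown")]
  else if flags.2.2 then
    [("platform", "MacOS"), ("arch", if PySem.Str.isIn "aarch64" name then "darwin-aarch64" else "darwin-x86_64")]
  else []

-- ===== PRECONDITION & SPEC =====
def Spec_get_asset_info (name : String) (out : List (String × String)) : Prop := out = get_asset_info_alt name
instance (name : String) (out : List (String × String)) : Decidable (Spec_get_asset_info name out) := by unfold Spec_get_asset_info; infer_instance

-- ===== CLAIM (what is proved, stated in full; the proofs are below) =====
def Claim_equal_get_asset_info : Prop := ∀ (name : String), Dom_get_asset_info name → Spec_get_asset_info name (get_asset_info name)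

-- ===== LEMMAS AND PROOFS =====

-- a 4-char pattern cannot occur in a shorter list
theorem isIn_false_of_short (pat l : List Char) (h : l.length < pat.length) :
    PySem.Chars.isIn pat l = false := by
  rw [PySem.Chars.isIn_eq_false_iff]
  intro hinf
  exact absurd hinf.length_le (by omega)

-- one scanner step equals peeling one character off the substring test
theorem isIn_step (x y z c a b d : Char) (rest : List Char) :
    (if c = '.' then (PySem.Chars.isIn ['.', x, y, z] (a :: b :: d :: rest) || (a = x && b = y && d = z))
     else PySem.Chars.isIn ['.', x, y, z] (a :: b :: d :: rest))
      = PySem.Chars.isIn ['.', x, y, z] (c :: a :: b :: d :: rest) := by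
  rw [Bool.eq_iff_iff]
  by_cases hc : c = '.' <;>
    simp [hc, PySem.Chars.isIn_iff_infix, List.infix_cons_iff, List.cons_prefix_cons] <;>
    tauto

-- the scanner's flags are exactly the three substring tests A performs
theorem scanExts_spec (l : List Char) :
    scanExts l = (PySem.Chars.isIn ['.', 'd', 'e', 'b'] l,
                  PySem.Chars.isIn ['.', 'e', 'x', 'e'] l,
                  PySem.Chars.isIn ['.', 'd', 'm', 'g'] l) := by
  induction l with
  | nil =>
      rw [isIn_false_of_short _ _ (by simp), isIn_false_of_short _ _ (by simp),
        isIn_false_of_short _ _ (by simp)]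
      rfl
  | cons c t ih =>
      match t, ih with
      | [], _ =>
          rw [isIn_false_of_short _ _ (by simp), isIn_false_of_short _ _ (by simp),
            isIn_false_of_short _ _ (by simp)]
          rfl
      | [a], _ =>
          rw [isIn_false_of_short _ _ (by simp), isIn_false_of_short _ _ (by simp),
            isIn_false_of_short _ _ (by simp)]
          rfl
      | [a, b], _ =>
          rw [isIn_false_of_short _ _ (by simp), isIn_false_of_short _ _ (by simp),
            isIn_false_of_short _ _ (by simp)]
          rfl
      | a :: b :: d :: rest, ih =>
          simp only [scanExts, ih]
          rw [Prod.mk.injEq, Prod.mk.injEq]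
          refine ⟨?_, ?_, ?_⟩ <;>
          · rw [← isIn_step]
            by_cases hc : c = '.' <;> simp [hc]

-- ===== VERDICT (by name: the statement is the Claim_ definition above) =====
theorem get_asset_info_spec : Claim_equal_get_asset_info := by
  intro name _
  unfold Spec_get_asset_info get_asset_info get_asset_info_alt
  rw [scanExts_spec]
  by_cases h1 : PySem.Chars.isIn ['.', 'd', 'e', 'b'] name.toList = true <;>
  by_cases h2 : PySem.Chars.isIn ['.', 'e', 'x', 'e'] name.toList = true <;>
  by_cases h3 : PySem.Chars.isIn ['.', 'd', 'm', 'g'] name.toList = true <;>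
    simp [h1, h2, h3, PySem.Dict.keys, PySem.Dict.insert, PySem.Dict.empty, PySem.Dict.getD,
      PySem.Dict.get?, List.find?, PySem.Dict.contains, PySem.Str.isIn]
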